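-- pv_equiv track=rewrite | github.com/Project-Ellie/DeepGomoku | new/wgomoku_build/wgomoku/GomokuTools.py | string_to_stones
-- ===== SOURCE A (Python) =====
-- def string_to_stones(encoded):
--     """
--     returns an array of pairs for a string-encoded sequence
--     e.g. [('A',1), ('M',14)] for 'a1m14'
--     """
--     x, y = encoded[0].upper(), 0
--     stones = []
--     for c in encoded[1:]:
--         if c.isdigit():
--             y = 10 * y + int(c)
--         else:
--             stones.append((x,y))
--             x = c.upper()
--             y = 0
--     stones.append((x,y))
--     return stones
-- ===== SOURCE B (Python) =====
-- def _tokens(encoded):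
--     # split into (head, digits) groups: one leading char plus its run of digit chars
--     toks = []
--     i, n = 0, len(encoded)
--     while i < n:
--         j = i + 1
--         while j < n and encoded[j].isdigit():
--             j += 1
--         toks.append((encoded[i], encoded[i + 1:j]))
--         i = j
--     return toks
--
--
-- def string_to_stones(encoded):
--     """
--     returns an array of pairs for a string-encoded sequence
--     e.g. [('A',1), ('M',14)] for 'a1m14'
--     """
--     return [(head.upper(),
--              sum((ord(c) - 48) * 10 ** i for i, c in enumerate(reversed(num))))
--             for head, num in _tokens(encoded)]
-- ===== Notes on version B (the rewrite author's own statement) =====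
-- stated objective: alternative
-- what changed: A interleaves parsing and numeric accumulation in one pass (Horner accumulator 10*y+int(c) with append-on-boundary); B first tokenizes the string into (head, digit-run) groups with a two-pointer index scan and then converts each group in a separate comprehension pass using a positional digit sum over enumerate(reversed(num)).
-- outside the precondition, e.g. on string_to_stones(''): A raises IndexError, B returns []
import Mathlib
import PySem

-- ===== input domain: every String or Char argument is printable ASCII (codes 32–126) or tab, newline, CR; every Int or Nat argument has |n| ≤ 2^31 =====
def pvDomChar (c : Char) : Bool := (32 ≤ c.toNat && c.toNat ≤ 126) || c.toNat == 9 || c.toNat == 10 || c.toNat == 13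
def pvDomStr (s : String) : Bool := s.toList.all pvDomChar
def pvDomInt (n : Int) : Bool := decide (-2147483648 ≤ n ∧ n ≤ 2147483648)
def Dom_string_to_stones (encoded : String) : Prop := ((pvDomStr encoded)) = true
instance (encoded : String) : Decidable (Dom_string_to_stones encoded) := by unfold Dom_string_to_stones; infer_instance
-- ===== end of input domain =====

-- B replaces A's interleaved one-pass accumulator by tokenize-then-convert (positional digit sum); same cost, different structure ("alternative").

-- ===== PORT A =====
-- the for-loop body over state (x, y, stones); int(c) on a digit char ported as
-- ofChars? with a .getD 0 totalization guard (unreachable: the branch requires c.isdigit()).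
def pvStepA (st : String × Int × List (String × Int)) (ch : Char) : String × Int × List (String × Int) :=
  if PySem.Chars.isdigit ch then
    (st.1, 10 * st.2.1 + (PySem.Int.ofChars? [ch]).getD 0, st.2.2)
  else
    (PySem.Str.upper (String.ofList [ch]), 0, st.2.2 ++ [(st.1, st.2.1)])

def string_to_stones (encoded : String) : List (String × Int) :=
  match encoded.toList with
  | [] => []  -- Python raises IndexError on encoded[0] here; excluded by Pre_
  | c :: rest =>
      let fin := rest.foldl pvStepA (PySem.Str.upper (String.ofList [c]), 0, [])
      fin.2.2 ++ [(fin.1, fin.2.1)]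

-- ===== PORT B =====
-- Source B's _tokens: each group is the char at i plus encoded[i+1:j], the following run
-- of digit chars (= takeWhile/dropWhile of the digit run), continuing at j.
def pvTokens : List Char → List (Char × List Char)
  | [] => []
  | c :: rest =>
      (c, rest.takeWhile PySem.Chars.isdigit) :: pvTokens (rest.dropWhile PySem.Chars.isdigit)
  termination_by l => l.length
  decreasing_by
    simpa using Nat.lt_succ_of_le (List.length_dropWhile_le _ _)

-- sum((ord(c) - 48) * 10 ** i for i, c in enumerate(reversed(num)))
def pvTokenVal (num : List Char) : Int :=
  (num.reverse.zipIdx.map (fun p => ((p.1.toNat : Int) - 48) * 10 ^ p.2)).sum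

def string_to_stones_alt (encoded : String) : List (String × Int) :=
  (pvTokens encoded.toList).map (fun t => (PySem.Str.upper (String.ofList [t.1]), pvTokenVal t.2))

-- ===== PRECONDITION & SPEC =====
-- Pre_ excludes only the empty string, on which A raises IndexError (encoded[0]).
def Pre_string_to_stones (encoded : String) : Prop := encoded.toList ≠ []
instance (encoded : String) : Decidable (Pre_string_to_stones encoded) := by unfold Pre_string_to_stones; infer_instance
def pvWitness_string_to_stones : String := "a1m14"

def Spec_string_to_stones (encoded : String) (out : List (String × Int)) : Prop := out = string_to_stones_alt encoded
instance (encoded : String) (out : List (String × Int)) : Decidable (Spec_string_to_stones encoded out) := by unfold Spec_string_to_stones; infer_instance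

-- ===== CLAIM (what is proved, stated in full; the proofs are below) =====
def Claim_equal_string_to_stones : Prop := ∀ (encoded : String), Dom_string_to_stones encoded → Pre_string_to_stones encoded → Spec_string_to_stones encoded (string_to_stones encoded)
-- ===== LEMMAS AND PROOFS =====

-- value of a single ASCII digit char as int(c)
theorem pv_single_digit_val (c : Char) (h : PySem.Chars.isdigit c = true) :
    (PySem.Int.ofChars? [c]).getD 0 = (c.toNat : Int) - 48 := by
  have h' : 48 ≤ c.toNat ∧ c.toNat ≤ 57 := by
    simp only [PySem.Chars.isdigit, Bool.and_eq_true, decide_eq_true_eq] at h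
    exact ⟨h.1, h.2⟩
  have hc : c = Char.ofNat c.toNat := (Char.ofNat_toNat c).symm
  obtain ⟨h1, h2⟩ := h'
  interval_cases h : c.toNat <;> rw [hc] <;> decide

-- A's loop, written as primitive recursion on the remaining characters
def pvGroups (x : String) (y : Int) : List Char → List (String × Int)
  | [] => [(x, y)]
  | c :: r =>
      if PySem.Chars.isdigit c then
        pvGroups x (10 * y + (PySem.Int.ofChars? [c]).getD 0) r
      else
        (x, y) :: pvGroups (PySem.Str.upper (String.ofList [c])) 0 r

-- A's foldl equals pvGroups appended to the stones accumulated so far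
theorem pv_foldl_groups (rest : List Char) :
    ∀ (x : String) (y : Int) (stones : List (String × Int)),
    (rest.foldl pvStepA (x, y, stones)).2.2
        ++ [((rest.foldl pvStepA (x, y, stones)).1, (rest.foldl pvStepA (x, y, stones)).2.1)]
      = stones ++ pvGroups x y rest := by
  induction rest with
  | nil => intro x y stones; simp [pvGroups]
  | cons c r ih =>
      intro x y stones
      by_cases h : PySem.Chars.isdigit c = true
      · simp only [List.foldl_cons, pvStepA, h, if_pos, pvGroups]
        exact ih _ _ _
      · simp only [List.foldl_cons, pvStepA, pvGroups, if_neg h]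
        rw [ih]
        simp

theorem pv_tokenVal_cons (c : Char) (num : List Char) :
    pvTokenVal (c :: num) = pvTokenVal num + ((c.toNat : Int) - 48) * 10 ^ num.length := by
  simp [pvTokenVal, List.zipIdx_append]

-- pvGroups after a fresh head equals B's token list, with the run value folded in
theorem pv_groups_tokens (rest : List Char) :
    ∀ (x : String) (y : Int),
    pvGroups x y rest
      = (x, y * 10 ^ (rest.takeWhile PySem.Chars.isdigit).length
            + pvTokenVal (rest.takeWhile PySem.Chars.isdigit))
        :: (pvTokens (rest.dropWhile PySem.Chars.isdigit)).map
             (fun t => (PySem.Str.upper (String.ofList [t.1]), pvTokenVal t.2)) := by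
  induction rest with
  | nil => intro x y; simp [pvGroups, pvTokens, pvTokenVal]
  | cons c r ih =>
      intro x y
      by_cases h : PySem.Chars.isdigit c = true
      · rw [show pvGroups x y (c :: r)
              = pvGroups x (10 * y + (PySem.Int.ofChars? [c]).getD 0) r from by
                simp [pvGroups, h]]
        rw [ih, List.takeWhile_cons_of_pos h, List.dropWhile_cons_of_pos h,
            pv_single_digit_val c h]
        congr 2
        rw [pv_tokenVal_cons]
        simp only [List.length_cons, pow_succ]
        ring
      · rw [show pvGroups x y (c :: r)
              = (x, y) :: pvGroups (PySem.Str.upper (String.ofList [c])) 0 r from by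
                simp [pvGroups, h]]
        rw [ih, List.takeWhile_cons_of_neg h, List.dropWhile_cons_of_neg h]
        simp only [List.length_nil, pow_zero, mul_one]
        rw [show pvTokenVal [] = 0 from by simp [pvTokenVal]]
        rw [show pvTokens (c :: r)
              = (c, r.takeWhile PySem.Chars.isdigit)
                  :: pvTokens (r.dropWhile PySem.Chars.isdigit) from by
                simp [pvTokens]]
        simp

-- ===== VERDICT (by name: the statement is the Claim_ definition above) =====
theorem string_to_stones_spec : Claim_equal_string_to_stones := by
  intro encoded _ hpre
  unfold Spec_string_to_stones string_to_stones string_to_stones_alt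
  rcases hl : encoded.toList with _ | ⟨c, rest⟩
  · exact absurd hl hpre
  · show (rest.foldl pvStepA (PySem.Str.upper (String.ofList [c]), 0, [])).2.2
          ++ [((rest.foldl pvStepA _).1, (rest.foldl pvStepA _).2.1)]
        = _
    rw [pv_foldl_groups rest (PySem.Str.upper (String.ofList [c])) 0 [],
        List.nil_append, pv_groups_tokens rest,
        show pvTokens (c :: rest)
          = (c, rest.takeWhile PySem.Chars.isdigit)
              :: pvTokens (rest.dropWhile PySem.Chars.isdigit) from by
          simp [pvTokens]]
    simp
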